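-- pv_equiv track=rewrite | github.com/Aspect5/fintel-v2 | backend/workflows/dependency_workflow.py | _extract_sections_from_result
-- ===== SOURCE A (Python) =====
-- def _extract_sections_from_result(result: str) -> dict:
--     """Extract sections from the final result using markdown headers"""
--     sections = {}
--
--     # Split by markdown headers
--     lines = result.split('\n')
--     current_section = None
--     current_content = []
--
--     for line in lines:
--         line = line.strip()
--
--         # Check for headers
--         if line.startswith('## '):
--             # Save previous section
--             if current_section and current_content:
--                 sections[current_section] = '\n'.join(current_content).strip()
--
--             # Start new section
--             header_text = line[3:].strip().lower()
--             current_section = header_text.replace(' ', '_')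
--             current_content = []
--
--         elif line.startswith('### '):
--             # Save previous section
--             if current_section and current_content:
--                 sections[current_section] = '\n'.join(current_content).strip()
--
--             # Start new section
--             header_text = line[4:].strip().lower()
--             current_section = header_text.replace(' ', '_')
--             current_content = []
--
--         elif current_section is not None:
--             current_content.append(line)
--
--     # Save last section
--     if current_section and current_content:
--         sections[current_section] = '\n'.join(current_content).strip()
--
--     return sections
-- ===== SOURCE B (Python) =====
-- def _header_key(line):
--     """Return the section key if the (already stripped) line is a markdown header, else None."""
--     if line.startswith('## '):
--         return line[3:].strip().lower().replace(' ', '_')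
--     if line.startswith('### '):
--         return line[4:].strip().lower().replace(' ', '_')
--     return None
--
--
-- def _split_chunk(lines):
--     """Split lines into (content before the next header, the rest starting at that header)."""
--     content = []
--     for idx, line in enumerate(lines):
--         if _header_key(line) is not None:
--             return content, lines[idx:]
--         content.append(line)
--     return content, []
--
--
-- def _extract_sections_from_result(result: str) -> dict:
--     """Extract sections from the final result using markdown headers"""
--     lines = [line.strip() for line in result.split('\n')]
--     sections = {}
--     rest = lines
--     while rest:
--         key = _header_key(rest[0])
--         if key is None:
--             rest = rest[1:]
--             continue
--         content, rest = _split_chunk(rest[1:])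
--         if key and content:
--             sections[key] = '\n'.join(content).strip()
--     return sections
-- ===== Notes on version B (the rewrite author's own statement) =====
-- stated objective: alternative
-- what changed: Replaced A's one-pass state machine (carrying current_section/current_content and saving on the next header) with a chunk-based scan: skip non-header lines, then for each header slice off the content up to the next header in one helper and save it immediately, with no carried section state.
import Mathlib
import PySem

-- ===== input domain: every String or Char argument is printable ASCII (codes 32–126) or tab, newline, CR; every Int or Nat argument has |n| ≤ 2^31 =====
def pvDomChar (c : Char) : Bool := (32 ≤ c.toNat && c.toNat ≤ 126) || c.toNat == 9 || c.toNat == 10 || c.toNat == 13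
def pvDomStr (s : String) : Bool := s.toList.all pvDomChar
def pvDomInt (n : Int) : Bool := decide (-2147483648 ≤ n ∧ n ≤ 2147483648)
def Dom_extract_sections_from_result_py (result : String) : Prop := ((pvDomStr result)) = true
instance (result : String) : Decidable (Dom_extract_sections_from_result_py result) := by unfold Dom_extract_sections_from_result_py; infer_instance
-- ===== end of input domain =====

-- B replaces A's carried-state single pass by a chunk scan (header → slice content → save); same values, alternative decomposition.

-- ===== PORT A =====

-- save of the pending section: 'if current_section and current_content: sections[current_section] = ...'
def pvSaveA (sections : PySem.Dict String String) (cur : Option String) (cont : List String) : PySem.Dict String String :=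
  match cur with
  | none => sections
  | some s => if (!(s == "")) && (!cont.isEmpty) then sections.insert s (PySem.Str.strip (PySem.Str.join "\n" cont)) else sections

-- one iteration of A's for-loop (line is stripped inside the loop)
def pvStepA (st : PySem.Dict String String × Option String × List String) (line0 : String) :
    PySem.Dict String String × Option String × List String :=
  let line := PySem.Str.strip line0
  if PySem.Str.startswith line "## " then
    (pvSaveA st.1 st.2.1 st.2.2,
     some (PySem.Str.replace (PySem.Str.lower (PySem.Str.strip (PySem.Str.slice line (some 3) none))) " " "_"), [])
  else if PySem.Str.startswith line "### " then
    (pvSaveA st.1 st.2.1 st.2.2,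
     some (PySem.Str.replace (PySem.Str.lower (PySem.Str.strip (PySem.Str.slice line (some 4) none))) " " "_"), [])
  else
    match st.2.1 with
    | some _ => (st.1, st.2.1, st.2.2 ++ [PySem.Str.strip line0])
    | none => st

def extract_sections_from_result_py (result : String) : List (String × String) :=
  let lines := (PySem.Str.split? result "\n").getD []
  let fin := lines.foldl pvStepA (PySem.Dict.empty, none, [])
  (pvSaveA fin.1 fin.2.1 fin.2.2).items

-- ===== PORT B =====

-- _header_key: the section key if the stripped line is a header, else none
def pvHeaderKey? (line : String) : Option String :=
  if PySem.Str.startswith line "## " then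
    some (PySem.Str.replace (PySem.Str.lower (PySem.Str.strip (PySem.Str.slice line (some 3) none))) " " "_")
  else if PySem.Str.startswith line "### " then
    some (PySem.Str.replace (PySem.Str.lower (PySem.Str.strip (PySem.Str.slice line (some 4) none))) " " "_")
  else none

-- _split_chunk: (content before the next header, rest starting at that header)
def pvSplitChunk (lines : List String) : List String × List String :=
  (lines.takeWhile (fun l => (pvHeaderKey? l).isNone), lines.dropWhile (fun l => (pvHeaderKey? l).isNone))

-- the while-loop over 'rest'
def pvAltGo (sections : PySem.Dict String String) (rest : List String) : PySem.Dict String String :=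
  match rest with
  | [] => sections
  | l :: tl =>
    match pvHeaderKey? l with
    | none => pvAltGo sections tl
    | some key =>
      let p := pvSplitChunk tl
      pvAltGo (if (!(key == "")) && (!p.1.isEmpty) then
                 sections.insert key (PySem.Str.strip (PySem.Str.join "\n" p.1))
               else sections) p.2
termination_by rest.length
decreasing_by
  · simp
  · simp only [pvSplitChunk]
    exact Nat.lt_succ_of_le (List.length_dropWhile_le _ _)

def extract_sections_from_result_py_alt (result : String) : List (String × String) :=
  let lines := ((PySem.Str.split? result "\n").getD []).map PySem.Str.strip
  (pvAltGo PySem.Dict.empty lines).items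

-- ===== PRECONDITION & SPEC =====
def Spec_extract_sections_from_result_py (result : String) (out : List (String × String)) : Prop := out = extract_sections_from_result_py_alt result
instance (result : String) (out : List (String × String)) : Decidable (Spec_extract_sections_from_result_py result out) := by unfold Spec_extract_sections_from_result_py; infer_instance

-- ===== CLAIM (what is proved, stated in full; the proofs are below) =====
def Claim_equal_extract_sections_from_result_py : Prop := ∀ (result : String), Dom_extract_sections_from_result_py result → Spec_extract_sections_from_result_py result (extract_sections_from_result_py result)

-- ===== LEMMAS AND PROOFS =====

-- A's step, matched through pvHeaderKey? of the stripped line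
lemma pvStepA_header (st : PySem.Dict String String × Option String × List String) (l : String)
    (k : String) (hk : pvHeaderKey? (PySem.Str.strip l) = some k) :
    pvStepA st l = (pvSaveA st.1 st.2.1 st.2.2, some k, []) := by
  unfold pvStepA
  unfold pvHeaderKey? at hk
  split_ifs at hk ⊢ <;> simp_all

lemma pvStepA_nonheader (st : PySem.Dict String String × Option String × List String) (l : String)
    (hk : pvHeaderKey? (PySem.Str.strip l) = none) :
    pvStepA st l = (match st.2.1 with
      | some _ => (st.1, st.2.1, st.2.2 ++ [PySem.Str.strip l])
      | none => st) := by
  unfold pvStepA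
  unfold pvHeaderKey? at hk
  split_ifs at hk ⊢ 
  all_goals simp_all

-- main invariant, pending section: fold then final save = altGo past the pending chunk's boundary
lemma pvFold_some (ls : List String) :
    ∀ (d : PySem.Dict String String) (k : String) (c : List String),
    (let fin := ls.foldl pvStepA (d, some k, c); pvSaveA fin.1 fin.2.1 fin.2.2) =
      pvAltGo (pvSaveA d (some k) (c ++ (ls.map PySem.Str.strip).takeWhile (fun l => (pvHeaderKey? l).isNone)))
              ((ls.map PySem.Str.strip).dropWhile (fun l => (pvHeaderKey? l).isNone)) := by
  induction ls with
  | nil => intro d k c; simp [pvAltGo]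
  | cons l tl ih =>
    intro d k c
    cases hk : pvHeaderKey? (PySem.Str.strip l) with
    | none =>
      simp only [List.foldl_cons, pvStepA_nonheader _ l hk]
      rw [ih d k (c ++ [PySem.Str.strip l])]
      simp [hk]
    | some k' =>
      simp only [List.foldl_cons, pvStepA_header _ l k' hk]
      rw [ih _ k' []]
      simp only [List.map_cons, List.takeWhile_cons, List.dropWhile_cons, hk, Option.isNone_some,
        Bool.false_eq_true, List.append_nil, ite_false]
      rw [pvAltGo]
      simp [hk, pvSplitChunk, pvSaveA]

-- no pending section: the fold skips lines until the first header
lemma pvFold_none (ls : List String) :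
    ∀ (d : PySem.Dict String String) (c : List String),
    (let fin := ls.foldl pvStepA (d, none, c); pvSaveA fin.1 fin.2.1 fin.2.2) =
      pvAltGo d (ls.map PySem.Str.strip) := by
  induction ls with
  | nil => intro d c; simp [pvAltGo, pvSaveA]
  | cons l tl ih =>
    intro d c
    cases hk : pvHeaderKey? (PySem.Str.strip l) with
    | none =>
      simp only [List.foldl_cons, pvStepA_nonheader _ l hk]
      rw [List.map_cons, pvAltGo, hk]
      exact ih d c
    | some k' =>
      simp only [List.foldl_cons, pvStepA_header _ l k' hk]
      rw [pvFold_some tl _ k' []]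
      simp only [pvSaveA]
      rw [List.map_cons, pvAltGo, hk]
      simp [pvSplitChunk]

-- ===== VERDICT (by name: the statement is the Claim_ definition above) =====
theorem extract_sections_from_result_py_spec : Claim_equal_extract_sections_from_result_py := by
  intro result _
  show _ = _
  unfold extract_sections_from_result_py extract_sections_from_result_py_alt
  exact congrArg PySem.Dict.items (pvFold_none _ PySem.Dict.empty [])
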